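-- pv_equiv track=rewrite | github.com/SergeyNPP/Stepik | квадратичность.py | count_quadratic_numbers
-- ===== SOURCE A (Python) =====
-- import math
--
-- def count_quadratic_numbers(limit):
--     count = 0
--     max_k = int(math.sqrt(limit))  # Максимальное значение k для проверки
--
--     # Перебираем все возможные k
--     for k in range(1, max_k + 1):
--         k_square = k**2
--
--         # Проверяем все возможные m
--         for m in range(1, k + 1):
--             m_square = m**2
--
--             # Проверяем оба возможных случая
--             if k_square - m_square > 0 and k_square - m_square <= limit:
--                 count += 1
--             if k_square + m_square <= limit:
--                 count += 1
--
--     return count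
-- ===== SOURCE B (Python) =====
-- import math
--
-- def count_quadratic_numbers(limit):
--     # For each k in 1..isqrt(limit): k^2 <= limit, so k^2 - m^2 is always
--     # within (0, limit] exactly for m = 1..k-1, contributing k-1; and
--     # k^2 + m^2 <= limit holds exactly for m = 1..min(k, isqrt(limit - k^2)).
--     s = math.isqrt(limit)
--     total = s * (s - 1) // 2
--     for k in range(1, s + 1):
--         total += min(k, math.isqrt(limit - k * k))
--     return total
-- ===== Notes on version B (the rewrite author's own statement) =====
-- stated objective: faster
-- what changed: Replaces the O(limit) double loop over (k,m) with a single O(sqrt(limit)) loop that counts each k's contributions in closed form: k-1 for the difference case plus min(k, isqrt(limit-k^2)) for the sum case, with the k-1 terms summed as s(s-1)/2.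
import Mathlib
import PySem

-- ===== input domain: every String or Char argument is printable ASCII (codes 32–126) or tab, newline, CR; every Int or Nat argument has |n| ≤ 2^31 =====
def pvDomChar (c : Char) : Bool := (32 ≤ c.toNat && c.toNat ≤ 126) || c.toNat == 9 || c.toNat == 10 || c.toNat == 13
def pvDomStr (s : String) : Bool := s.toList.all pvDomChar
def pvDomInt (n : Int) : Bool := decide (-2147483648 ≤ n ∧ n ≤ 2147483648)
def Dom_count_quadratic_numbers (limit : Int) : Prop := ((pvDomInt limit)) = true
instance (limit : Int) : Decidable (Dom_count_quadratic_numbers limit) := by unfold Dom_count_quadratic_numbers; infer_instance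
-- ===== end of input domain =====

-- B replaces A's O(limit) double loop by one O(sqrt(limit)) loop of per-k closed-form
-- range counts (objective: faster, asymptotic).

-- ===== PORT A =====
-- int(math.sqrt(limit)) is ported as Int.sqrt: exact on the domain (0 ≤ limit ≤ 2^31,
-- where the correctly-rounded IEEE double sqrt truncates to the integer sqrt);
-- math.sqrt raises ValueError for limit < 0, which Pre_ excludes.
def count_quadratic_numbers (limit : Int) : Int :=
  let max_k := Int.sqrt limit
  (PySem.List.pyRange 1 (max_k + 1) 1).foldl (fun count k =>
    let k_square := k ^ 2
    (PySem.List.pyRange 1 (k + 1) 1).foldl (fun count m =>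
      let m_square := m ^ 2
      let count := if k_square - m_square > 0 ∧ k_square - m_square ≤ limit then count + 1 else count
      if k_square + m_square ≤ limit then count + 1 else count) count) 0

-- ===== PORT B =====
-- math.isqrt is Int.sqrt (it raises ValueError for limit < 0, excluded by Pre_).
def count_quadratic_numbers_alt (limit : Int) : Int :=
  let s := Int.sqrt limit
  (PySem.List.pyRange 1 (s + 1) 1).foldl
    (fun total k => total + min k (Int.sqrt (limit - k * k)))
    (PySem.Int.floordiv (s * (s - 1)) 2)

-- ===== PRECONDITION & SPEC =====
-- A raises ValueError (math.sqrt of a negative) for limit < 0; B's math.isqrt raises there too.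
def Pre_count_quadratic_numbers (limit : Int) : Prop := 0 ≤ limit
instance (limit : Int) : Decidable (Pre_count_quadratic_numbers limit) := by unfold Pre_count_quadratic_numbers; infer_instance
def pvWitness_count_quadratic_numbers : Int := 10

def Spec_count_quadratic_numbers (limit : Int) (out : Int) : Prop := out = count_quadratic_numbers_alt limit
instance (limit : Int) (out : Int) : Decidable (Spec_count_quadratic_numbers limit out) := by unfold Spec_count_quadratic_numbers; infer_instance

-- ===== CLAIM (what is proved, stated in full; the proofs are below) =====
def Claim_equal_count_quadratic_numbers : Prop := ∀ (limit : Int), Dom_count_quadratic_numbers limit → Pre_count_quadratic_numbers limit → Spec_count_quadratic_numbers limit (count_quadratic_numbers limit)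

-- ===== LEMMAS AND PROOFS =====

-- bracket characterisation of the integer square root (both programs use it)
theorem pvSqrtLe (m n : Int) (hm : 0 ≤ m) (hn : 0 ≤ n) : m ≤ Int.sqrt n ↔ m * m ≤ n := by
  rcases Int.eq_ofNat_of_zero_le hm with ⟨a, rfl⟩
  rcases Int.eq_ofNat_of_zero_le hn with ⟨b, rfl⟩
  unfold Int.sqrt
  simp only [Int.toNat_natCast]
  constructor
  · intro h
    have := Nat.le_sqrt.mp (show a ≤ Nat.sqrt b by exact_mod_cast h)
    exact_mod_cast this
  · intro h
    have := Nat.le_sqrt.mpr (show a * a ≤ b by exact_mod_cast h)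
    exact_mod_cast this

-- value of A's inner-loop per-m contributions summed over m = 1..n
theorem pvInnerSum (limit k : Int) (hk : 1 ≤ k) (hk2 : k * k ≤ limit) :
    ∀ (n : Nat), (n : Int) ≤ k →
      ((PySem.List.pyRange 1 ((n : Int) + 1) 1).map
        (fun m => (if k ^ 2 - m ^ 2 > 0 ∧ k ^ 2 - m ^ 2 ≤ limit then (1 : Int) else 0)
                + (if k ^ 2 + m ^ 2 ≤ limit then (1 : Int) else 0))).sum
      = min (n : Int) (k - 1) + min (n : Int) (Int.sqrt (limit - k * k)) := by
  intro n
  induction n with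
  | zero =>
    intro _
    have ht : 0 ≤ Int.sqrt (limit - k * k) := Int.sqrt_nonneg _
    rw [show ((0 : Nat) : Int) + 1 = 1 by simp,
        PySem.List.pyRange_one_eq_nil (le_refl 1)]
    simp; omega
  | succ n ih =>
    intro hn
    have hn' : (n : Int) ≤ k := by push_cast at hn ⊢; omega
    have hsplit : PySem.List.pyRange 1 (((n + 1 : Nat) : Int) + 1) 1
        = PySem.List.pyRange 1 ((n : Int) + 1) 1 ++ [(n : Int) + 1] := by
      have := PySem.List.pyRange_one_succ_right (a := 1) (b := (n : Int) + 1) (by omega)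
      push_cast
      push_cast at this
      exact this
    rw [hsplit, List.map_append, List.sum_append, ih hn']
    have hm1 : (1 : Int) ≤ (n : Int) + 1 := by omega
    have hmk : (n : Int) + 1 ≤ k := by push_cast at hn; omega
    set m : Int := (n : Int) + 1 with hm
    set t : Int := Int.sqrt (limit - k * k) with htdef
    have ht : 0 ≤ t := Int.sqrt_nonneg _
    have hc1 : (k ^ 2 - m ^ 2 > 0 ∧ k ^ 2 - m ^ 2 ≤ limit) ↔ m < k := by
      constructor
      · rintro ⟨h1, _⟩
        nlinarith
      · intro h
        constructor
        · nlinarith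
        · nlinarith
    have hc2 : (k ^ 2 + m ^ 2 ≤ limit) ↔ m ≤ t := by
      rw [htdef, pvSqrtLe m (limit - k * k) (by omega) (by omega)]
      have h1 : m ^ 2 = m * m := pow_two m
      have h2 : k ^ 2 = k * k := pow_two k
      constructor <;> intro h <;> nlinarith
    simp only [List.map_cons, List.map_nil, List.sum_cons, List.sum_nil]
    rw [if_congr hc1 rfl rfl, if_congr hc2 rfl rfl]
    split_ifs <;> push_cast <;> omega

-- Σ_{k=1}^{n} (k-1) = n(n-1)/2
theorem pvTriSum : ∀ (n : Nat),
    ((PySem.List.pyRange 1 ((n : Int) + 1) 1).map (fun k => k - 1)).sum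
      = (n : Int) * ((n : Int) - 1) / 2 := by
  intro n
  induction n with
  | zero =>
    rw [show ((0 : Nat) : Int) + 1 = 1 by simp,
        PySem.List.pyRange_one_eq_nil (le_refl 1)]
    simp
  | succ n ih =>
    have hsplit : PySem.List.pyRange 1 (((n + 1 : Nat) : Int) + 1) 1
        = PySem.List.pyRange 1 ((n : Int) + 1) 1 ++ [(n : Int) + 1] := by
      have := PySem.List.pyRange_one_succ_right (a := 1) (b := (n : Int) + 1) (by omega)
      push_cast
      push_cast at this
      exact this
    rw [hsplit, List.map_append, List.sum_append, ih]
    simp only [List.map_cons, List.map_nil, List.sum_cons, List.sum_nil]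
    push_cast
    have hsq : ((n : Int) + 1) * ((n : Int) + 1 - 1) = (n : Int) * ((n : Int) - 1) + 2 * (n : Int) := by ring
    omega

-- A's inner loop over m, as a function of its start value
theorem pvInnerFold (limit k : Int) (hk : 1 ≤ k) (hk2 : k * k ≤ limit) (c : Int) :
    (PySem.List.pyRange 1 (k + 1) 1).foldl (fun count m =>
      let m_square := m ^ 2
      let count := if k ^ 2 - m_square > 0 ∧ k ^ 2 - m_square ≤ limit then count + 1 else count
      if k ^ 2 + m_square ≤ limit then count + 1 else count) c
    = c + ((k - 1) + min k (Int.sqrt (limit - k * k))) := by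
  have hcongr := PySem.List.foldl_congr_mem (PySem.List.pyRange 1 (k + 1) 1)
    (fun count m =>
      let m_square := m ^ 2
      let count := if k ^ 2 - m_square > 0 ∧ k ^ 2 - m_square ≤ limit then count + 1 else count
      if k ^ 2 + m_square ≤ limit then count + 1 else count)
    (fun count m => count +
      ((if k ^ 2 - m ^ 2 > 0 ∧ k ^ 2 - m ^ 2 ≤ limit then (1 : Int) else 0)
        + (if k ^ 2 + m ^ 2 ≤ limit then (1 : Int) else 0))) c
    (by intro acc x _; simp only []; split_ifs <;> ring)
  rw [hcongr, PySem.List.foldl_add]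
  have hkn : ((k.toNat : Int)) = k := Int.toNat_of_nonneg (by omega)
  have := pvInnerSum limit k hk hk2 k.toNat (by omega)
  rw [hkn] at this
  rw [this]
  have ht : 0 ≤ Int.sqrt (limit - k * k) := Int.sqrt_nonneg _
  omega

-- ===== VERDICT (by name: the statement is the Claim_ definition above) =====
theorem count_quadratic_numbers_spec : Claim_equal_count_quadratic_numbers := by
  intro limit _ hpre
  unfold Spec_count_quadratic_numbers count_quadratic_numbers count_quadratic_numbers_alt
  simp only []
  set s : Int := Int.sqrt limit with hs
  have hs0 : 0 ≤ s := Int.sqrt_nonneg _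
  -- every k in the outer range satisfies 1 ≤ k and k*k ≤ limit
  have houter := PySem.List.foldl_congr_mem (PySem.List.pyRange 1 (s + 1) 1)
    (fun count k =>
      let k_square := k ^ 2
      (PySem.List.pyRange 1 (k + 1) 1).foldl (fun count m =>
        let m_square := m ^ 2
        let count := if k_square - m_square > 0 ∧ k_square - m_square ≤ limit then count + 1 else count
        if k_square + m_square ≤ limit then count + 1 else count) count)
    (fun count k => count + ((k - 1) + min k (Int.sqrt (limit - k * k)))) 0
    (by
      intro acc k hkmem
      have hkb := (PySem.List.mem_pyRange_one).mp hkmem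
      have hk1 : 1 ≤ k := hkb.1
      have hks : k ≤ s := by omega
      have hkk : k * k ≤ limit := (pvSqrtLe k limit (by omega) hpre).mp (by rw [← hs]; omega)
      exact pvInnerFold limit k hk1 hkk acc)
  rw [houter, PySem.List.foldl_add, PySem.List.foldl_add]
  rw [PySem.List.sum_map_add_int (PySem.List.pyRange 1 (s + 1) 1) (fun k => k - 1)
        (fun k => min k (Int.sqrt (limit - k * k)))]
  have hsn : ((s.toNat : Int)) = s := Int.toNat_of_nonneg hs0
  have htri := pvTriSum s.toNat
  rw [hsn] at htri
  rw [htri, PySem.Int.floordiv_eq_ediv_of_pos (by omega : (0:Int) < 2)]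
  ring
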